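-- pv_equiv track=rewrite | github.com/J2r2mie/obsidian-tools | reprocess_perplexity.py | extract_json_blocks
-- ===== SOURCE A (Python) =====
-- def extract_json_blocks(text):
--     """Extrait les blocs JSON (arrays [...]) du texte brut."""
--     blocks, depth, start = [], 0, None
--     in_string, escape_next = False, False
--     for i, ch in enumerate(text):
--         if escape_next:
--             escape_next = False
--             continue
--         if ch == "\\" and in_string:
--             escape_next = True
--             continue
--         if ch == '"':
--             in_string = not in_string
--             continue
--         if in_string:
--             continue
--         if ch == "[":
--             if depth == 0:
--                 start = i
--             depth += 1
--         elif ch == "]":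
--             depth -= 1
--             if depth == 0 and start is not None:
--                 blocks.append(text[start:i + 1])
--                 start = None
--     return blocks
-- ===== SOURCE B (Python) =====
-- def _active(text):
--     """Positions/chars outside any string literal (3-state automaton)."""
--     OUT, IN, ESC = 0, 1, 2
--     state = OUT
--     out = []
--     for i, ch in enumerate(text):
--         if state == ESC:
--             state = IN
--         elif ch == '"':
--             state = IN if state == OUT else OUT
--         elif state == IN:
--             state = ESC if ch == "\\" else IN
--         else:
--             out.append((i, ch))
--     return out
--
--
-- def _blocks(text, active):
--     depth, start = 0, None
--     for i, ch in active:
--         if ch == "[":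
--             if depth == 0:
--                 start = i
--             depth += 1
--         elif ch == "]":
--             depth -= 1
--             if depth == 0 and start is not None:
--                 yield text[start:i + 1]
--                 start = None
--
--
-- def extract_json_blocks(text):
--     """Two passes: mask string literals first, then bracket-match the rest."""
--     return list(_blocks(text, _active(text)))
-- ===== Notes on version B (the rewrite author's own statement) =====
-- stated objective: alternative
-- what changed: A's single fused state machine is split into two passes: a 3-state automaton (OUT/IN/ESC) first collects the (index, char) pairs outside string literals, then a separate bracket-matching generator over that list emits text[start:i+1] slices by absolute index.
import Mathlib
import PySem

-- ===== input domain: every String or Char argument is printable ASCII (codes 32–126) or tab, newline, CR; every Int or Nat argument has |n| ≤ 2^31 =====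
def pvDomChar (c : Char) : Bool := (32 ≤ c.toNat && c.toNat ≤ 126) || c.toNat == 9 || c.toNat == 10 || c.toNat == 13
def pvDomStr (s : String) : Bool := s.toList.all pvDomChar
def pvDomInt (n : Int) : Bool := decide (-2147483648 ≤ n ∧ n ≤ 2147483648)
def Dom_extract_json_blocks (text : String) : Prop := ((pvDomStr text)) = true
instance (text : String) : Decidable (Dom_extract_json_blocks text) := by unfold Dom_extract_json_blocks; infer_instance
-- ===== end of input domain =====

-- B re-decomposes A's single fused state machine into two passes (string-mask, then
-- bracket-match); objective: alternative decomposition, same cost, same values everywhere.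

-- ===== PORT A =====
-- single fused loop over enumerate(text): state (blocks, depth, start, in_string, escape_next)
def goA (text : String) : List (Int × Char) → List String → Int → Option Int → Bool → Bool → List String
  | [], blocks, _, _, _, _ => blocks
  | (i, ch) :: rest, blocks, depth, start, ins, esc =>
    if esc then goA text rest blocks depth start ins false
    else if ch = '\\' ∧ ins = true then goA text rest blocks depth start ins true
    else if ch = '"' then goA text rest blocks depth start (!ins) esc
    else if ins then goA text rest blocks depth start ins esc
    else if ch = '[' then
      goA text rest blocks (depth + 1) (if depth = 0 then some i else start) ins esc
    else if ch = ']' then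
      match start with
      | some s =>
        if depth - 1 = 0 then
          goA text rest (blocks ++ [PySem.Str.slice text (some s) (some (i + 1))]) (depth - 1) none ins esc
        else goA text rest blocks (depth - 1) (some s) ins esc
      | none => goA text rest blocks (depth - 1) none ins esc
    else goA text rest blocks depth start ins esc

def extract_json_blocks (text : String) : List String :=
  goA text (PySem.List.enumerate text.toList 0) [] 0 none false false

-- ===== PORT B =====
-- pass 1: the (index, char) pairs outside string literals (3-state automaton 0=OUT 1=IN 2=ESC)
def active_pass : List (Int × Char) → Nat → List (Int × Char)
  | [], _ => []
  | (i, ch) :: rest, state =>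
    if state = 2 then active_pass rest 1
    else if ch = '"' then active_pass rest (if state = 0 then 1 else 0)
    else if state = 1 then active_pass rest (if ch = '\\' then 2 else 1)
    else (i, ch) :: active_pass rest 0

-- pass 2: bracket-match the active positions, yielding slices by absolute index
def scan_pass (text : String) : List (Int × Char) → Int → Option Int → List String
  | [], _, _ => []
  | (i, ch) :: rest, depth, start =>
    if ch = '[' then scan_pass text rest (depth + 1) (if depth = 0 then some i else start)
    else if ch = ']' then
      match start with
      | some s =>
        if depth - 1 = 0 then
          PySem.Str.slice text (some s) (some (i + 1)) :: scan_pass text rest (depth - 1) none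
        else scan_pass text rest (depth - 1) (some s)
      | none => scan_pass text rest (depth - 1) none
    else scan_pass text rest depth start

def extract_json_blocks_alt (text : String) : List String :=
  scan_pass text (active_pass (PySem.List.enumerate text.toList 0) 0) 0 none

-- ===== PRECONDITION & SPEC =====
def Spec_extract_json_blocks (text : String) (out : List String) : Prop := out = extract_json_blocks_alt text
instance (text : String) (out : List String) : Decidable (Spec_extract_json_blocks text out) := by unfold Spec_extract_json_blocks; infer_instance

-- ===== CLAIM (what is proved, stated in full; the proofs are below) =====
def Claim_equal_extract_json_blocks : Prop := ∀ (text : String), Dom_extract_json_blocks text → Spec_extract_json_blocks text (extract_json_blocks text)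

-- ===== LEMMAS AND PROOFS =====
-- the fused machine equals pass2 applied to pass1's output, for every reachable string state
lemma goA_eq_two_pass (text : String) :
    ∀ (l : List (Int × Char)) (blocks : List String) (depth : Int) (start : Option Int)
      (ins esc : Bool), (esc = true → ins = true) →
      goA text l blocks depth start ins esc =
        blocks ++ scan_pass text (active_pass l (if esc then 2 else if ins then 1 else 0)) depth start := by
  intro l
  induction l with
  | nil => intro blocks depth start ins esc _; simp [goA, active_pass, scan_pass]
  | cons p rest ih =>
    obtain ⟨i, ch⟩ := p
    intro blocks depth start ins esc hre
    cases esc with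
    | true =>
      have hins := hre rfl; subst hins
      simp [goA, active_pass, ih blocks depth start true false (by simp)]
    | false =>
      cases ins with
      | true =>
        by_cases hq : ch = '"'
        · subst hq
          simp [goA, active_pass, ih blocks depth start false false (by simp)]
        · by_cases hb : ch = '\\'
          · subst hb
            simp [goA, active_pass, ih blocks depth start true true (by simp)]
          · simp [goA, active_pass, hq, hb, ih blocks depth start true false (by simp)]
      | false =>
        by_cases hq : ch = '"'
        · subst hq
          simp [goA, active_pass, ih blocks depth start true false (by simp)]
        · by_cases ho : ch = '['
          · subst ho
            simp [goA, active_pass, scan_pass,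
              ih blocks (depth + 1) (if depth = 0 then some i else start) false false (by simp)]
          · by_cases hc : ch = ']'
            · subst hc
              cases start with
              | none =>
                simp [goA, active_pass, scan_pass,
                  ih blocks (depth - 1) none false false (by simp)]
              | some s =>
                by_cases hd : depth - 1 = 0
                · simp [goA, active_pass, scan_pass, hd,
                    ih (blocks ++ [PySem.Str.slice text (some s) (some (i + 1))]) 0 none false false (by simp)]
                · simp [goA, active_pass, scan_pass, hd,
                    ih blocks (depth - 1) (some s) false false (by simp)]
            · simp [goA, active_pass, scan_pass, hq, ho, hc,
                ih blocks depth start false false (by simp)]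

-- ===== VERDICT (by name: the statement is the Claim_ definition above) =====
theorem extract_json_blocks_spec : Claim_equal_extract_json_blocks := by
  intro text _
  unfold Spec_extract_json_blocks extract_json_blocks extract_json_blocks_alt
  simpa using goA_eq_two_pass text (PySem.List.enumerate text.toList 0) [] 0 none false false (by simp)
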